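-- pv_equiv track=rewrite | github.com/sergey-lb/store-sales | app/lib.py | best_store_by_total_sales
-- ===== SOURCE A (Python) =====
-- def best_store_by_total_sales(weekly_sales):
--     """
--     >>> best_store_by_total_sales([
--     ...     [10, 10, 10, 10, 10, 10, 10],
--     ...     [1, 1, 1, 1, 1, 1, 1],
--     ...     [1, 1, 1, 1, 1],
--     ...     []
--     ... ])
--     [0]
--
--     >>> best_store_by_total_sales([
--     ...     [10, 10, 10, 10, 10, 10, 10],
--     ...     [1, 1, 1, 1, 1, 1, 1],
--     ...     [10, 10, 10, 10, 10, 10, 10],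
--     ...     [1, 1, 1, 1, 1],
--     ...     []
--     ... ])
--     [0, 2]
--
--     >>> best_store_by_total_sales([])
--     []
--     """
--
--     best_total_sales = 0;
--     for store_sales in weekly_sales:
--         store_total_sales = sum(store_sales)
--         if store_total_sales > best_total_sales:
--             best_total_sales = store_total_sales
--
--     result = []
--     for i, store_sales in enumerate(weekly_sales):
--         if sum(store_sales) == best_total_sales:
--             result.append(i)
--
--     return result
-- ===== SOURCE B (Python) =====
-- def best_store_by_total_sales(weekly_sales):
--     best = 0
--     result = []
--     for i, store_sales in enumerate(weekly_sales):
--         t = sum(store_sales)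
--         if t > best:
--             best = t
--             result = [i]
--         elif t == best:
--             result.append(i)
--     return result
-- ===== Notes on version B (the rewrite author's own statement) =====
-- stated objective: alternative
-- what changed: B replaces A's two staged passes (compute the running max of sums, then rescan all stores collecting matchers) with a single pass keeping a (best, result) accumulator that resets the index list whenever a new maximum appears and appends on ties, so each store's sum is computed once and no second scan exists.
import Mathlib
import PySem

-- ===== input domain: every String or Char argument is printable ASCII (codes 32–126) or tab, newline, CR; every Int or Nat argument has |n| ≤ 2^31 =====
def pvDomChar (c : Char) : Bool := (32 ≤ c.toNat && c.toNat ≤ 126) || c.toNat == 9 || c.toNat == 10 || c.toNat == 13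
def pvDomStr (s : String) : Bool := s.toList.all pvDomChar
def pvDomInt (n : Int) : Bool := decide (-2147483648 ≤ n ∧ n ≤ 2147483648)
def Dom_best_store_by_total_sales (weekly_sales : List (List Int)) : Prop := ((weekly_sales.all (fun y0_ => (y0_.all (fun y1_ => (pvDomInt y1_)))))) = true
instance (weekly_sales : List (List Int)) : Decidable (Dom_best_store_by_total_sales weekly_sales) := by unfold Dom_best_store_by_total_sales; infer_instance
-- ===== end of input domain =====

-- B is a single pass keeping a (best, result) accumulator (reset on a new maximum, append on
-- a tie) instead of A's two staged passes; an alternative of the same asymptotic cost.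

-- ===== PORT A =====
def best_store_by_total_sales (weekly_sales : List (List Int)) : List Int :=
  let best_total_sales : Int :=
    weekly_sales.foldl
      (fun best store_sales =>
        let store_total_sales := store_sales.sum
        if store_total_sales > best then store_total_sales else best) 0
  (PySem.List.enumerate weekly_sales).foldl
    (fun result p => if p.2.sum = best_total_sales then result ++ [p.1] else result) []

-- ===== PORT B =====
def best_store_by_total_sales_alt (weekly_sales : List (List Int)) : List Int :=
  ((PySem.List.enumerate weekly_sales).foldl
    (fun st p =>
      let t := p.2.sum
      if t > st.1 then (t, [p.1])
      else if t = st.1 then (st.1, st.2 ++ [p.1])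
      else st)
    ((0 : Int), ([] : List Int))).2

-- ===== PRECONDITION & SPEC =====
def Spec_best_store_by_total_sales (weekly_sales : List (List Int)) (out : List Int) : Prop := out = best_store_by_total_sales_alt weekly_sales
instance (weekly_sales : List (List Int)) (out : List Int) : Decidable (Spec_best_store_by_total_sales weekly_sales out) := by unfold Spec_best_store_by_total_sales; infer_instance

-- ===== CLAIM (what is proved, stated in full; the proofs are below) =====
def Claim_equal_best_store_by_total_sales : Prop := ∀ (weekly_sales : List (List Int)), Dom_best_store_by_total_sales weekly_sales → Spec_best_store_by_total_sales weekly_sales (best_store_by_total_sales weekly_sales)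

-- ===== LEMMAS AND PROOFS =====

-- A's selection loop (value v, empty accumulator), as a named function for the proofs.
def bssSel (v : Int) (ws : List (List Int)) (s : Int) : List Int :=
  (PySem.List.enumerate ws s).foldl
    (fun result p => if p.2.sum = v then result ++ [p.1] else result) []

-- pulling the accumulator out of the selection fold
theorem bssSel_acc (v : Int) (ws : List (List Int)) (s : Int) (acc : List Int) :
    (PySem.List.enumerate ws s).foldl
        (fun result p => if p.2.sum = v then result ++ [p.1] else result) acc
      = acc ++ bssSel v ws s := by
  induction ws generalizing s acc with
  | nil => simp [bssSel, PySem.List.enumerate_nil]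
  | cons x t ih =>
      simp only [bssSel, PySem.List.enumerate_cons, List.foldl]
      rw [ih, ih]
      by_cases h : x.sum = v <;> simp [h, bssSel]

theorem bssSel_cons (v : Int) (x : List Int) (t : List (List Int)) (s : Int) :
    bssSel v (x :: t) s
      = (if x.sum = v then [s] else []) ++ bssSel v t (s + 1) := by
  simp only [bssSel, PySem.List.enumerate_cons, List.foldl]
  by_cases h : x.sum = v
  · simp only [h]
    rw [bssSel_acc]; simp [bssSel]
  · simp [h]

-- A's running-max loop over weekly_sales equals the fold of `max` over the totals list.
theorem bssA_best_eq_foldl_max (ws : List (List Int)) (c : Int) :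
    ws.foldl
      (fun best store_sales =>
        let t := store_sales.sum
        if t > best then t else best) c
      = (ws.map (fun s => s.sum)).foldl max c := by
  induction ws generalizing c with
  | nil => rfl
  | cons x t ih =>
      simp only [List.foldl, List.map]
      rw [ih]
      congr 1
      rcases lt_or_ge c x.sum with h | h
      · simp [max_eq_right h.le, h]
      · simp [max_eq_left h, not_lt.mpr h]

theorem bss_le_foldl_max (l : List Int) (b : Int) : b ≤ l.foldl max b := by
  induction l generalizing b with
  | nil => simp
  | cons x t ih => exact le_trans (le_max_left b x) (ih (max b x))

-- invariant of B's single pass: it ends with the fold-max as best, and the result is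
-- the carried accumulator extended by the matchers of b when no new maximum appears,
-- or exactly the matchers of the new maximum otherwise.
theorem bssB_invariant (ws : List (List Int)) (s b : Int) (r : List Int) :
    (PySem.List.enumerate ws s).foldl
        (fun st p =>
          let t := p.2.sum
          if t > st.1 then (t, [p.1])
          else if t = st.1 then (st.1, st.2 ++ [p.1])
          else st)
        (b, r)
      = ((ws.map (fun s => s.sum)).foldl max b,
         if (ws.map (fun s => s.sum)).foldl max b = b
           then r ++ bssSel b ws s
           else bssSel ((ws.map (fun s => s.sum)).foldl max b) ws s) := by
  induction ws generalizing s b r with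
  | nil => simp [bssSel, PySem.List.enumerate_nil]
  | cons x t ih =>
      simp only [List.map, List.foldl, PySem.List.enumerate_cons]
      by_cases h1 : x.sum > b
      · simp only [if_pos h1]
        rw [ih]
        have hmax : max b x.sum = x.sum := max_eq_right h1.le
        rw [hmax]
        have hM : x.sum ≤ (t.map (fun s => s.sum)).foldl max x.sum := bss_le_foldl_max _ _
        have hMb : (t.map (fun s => s.sum)).foldl max x.sum ≠ b := by
          intro hc; rw [hc] at hM; exact absurd hM (not_le.mpr h1)
        rw [if_neg hMb]
        by_cases h2 : (t.map (fun s => s.sum)).foldl max x.sum = x.sum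
        · rw [if_pos h2, bssSel_cons]
          simp [h2]
        · rw [if_neg h2, bssSel_cons]
          have : x.sum ≠ (t.map (fun s => s.sum)).foldl max x.sum := fun hc => h2 hc.symm
          simp [this]
      · simp only [if_neg h1]
        have hmax : max b x.sum = b := max_eq_left (not_lt.mp h1)
        by_cases h2 : x.sum = b
        · simp only [if_pos h2]
          rw [ih, hmax]
          by_cases h3 : (t.map (fun s => s.sum)).foldl max b = b
          · rw [if_pos h3, if_pos h3, bssSel_cons]
            simp [h2]
          · rw [if_neg h3, if_neg h3, bssSel_cons]
            have : x.sum ≠ (t.map (fun s => s.sum)).foldl max b := by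
              intro hc; exact h3 (by rw [← hc, h2])
            simp [this]
        · simp only [if_neg h2]
          rw [ih, hmax]
          by_cases h3 : (t.map (fun s => s.sum)).foldl max b = b
          · rw [if_pos h3, if_pos h3, bssSel_cons]
            simp [h2]
          · rw [if_neg h3, if_neg h3, bssSel_cons]
            have : x.sum ≠ (t.map (fun s => s.sum)).foldl max b := by
              intro hc
              have := bss_le_foldl_max (t.map (fun s => s.sum)) b
              rw [← hc] at this
              exact h2 (le_antisymm (not_lt.mp h1) this)
            simp [this]

-- ===== VERDICT (by name: the statement is the Claim_ definition above) =====
theorem best_store_by_total_sales_spec : Claim_equal_best_store_by_total_sales := by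
  intro ws _
  unfold Spec_best_store_by_total_sales best_store_by_total_sales best_store_by_total_sales_alt
  simp only []
  rw [bssA_best_eq_foldl_max, bssB_invariant]
  by_cases h : (ws.map (fun s => s.sum)).foldl max 0 = 0
  · simp [h, bssSel]
  · simp [h, bssSel]
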